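-- pv_equiv track=rewrite | github.com/GeeksforGeeks-VIT-Bhopal/GeekWeek-Local | weekend-codes/prob 2 weekend.py | hurdleRace
-- ===== SOURCE A (Python) =====
-- def hurdleRace(k, height):
--     pcount = 0
--     for i in height:
--         if k >= i:
--             pcount += 0
--         else:
--             pcount += i-k
--             k += i-k
--     else:
--         return pcount
-- ===== SOURCE B (Python) =====
-- def hurdleRace(k, height):
--     return max(0, max(height, default=k) - k)
-- ===== Notes on version B (the rewrite author's own statement) =====
-- stated objective: simpler
-- what changed: Replaced the stateful loop (which raises k to each taller hurdle while accumulating the increments) with the closed form max(0, max(height, default=k) - k).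
import Mathlib
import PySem

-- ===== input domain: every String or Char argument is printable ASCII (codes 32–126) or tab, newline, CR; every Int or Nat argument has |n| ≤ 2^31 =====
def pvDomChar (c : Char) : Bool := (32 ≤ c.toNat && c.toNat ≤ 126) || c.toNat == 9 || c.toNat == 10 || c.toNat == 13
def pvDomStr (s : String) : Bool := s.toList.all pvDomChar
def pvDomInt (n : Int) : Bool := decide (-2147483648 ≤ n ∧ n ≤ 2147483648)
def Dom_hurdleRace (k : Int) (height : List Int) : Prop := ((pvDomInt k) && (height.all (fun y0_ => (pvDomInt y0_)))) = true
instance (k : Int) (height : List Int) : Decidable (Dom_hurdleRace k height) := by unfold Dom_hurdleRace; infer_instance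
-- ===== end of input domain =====

-- B replaces A's stateful loop with the closed form max(0, max(height, default=k) - k); objective: simpler.

-- ===== PORT A =====
-- loop state: (k, pcount); k is raised to i whenever i > k, pcount accumulates i - k
def hurdleRace (k : Int) (height : List Int) : Int :=
  (height.foldl (fun s i => if s.1 ≥ i then (s.1, s.2 + 0) else (i, s.2 + (i - s.1))) (k, 0)).2

-- ===== PORT B =====
-- max(height, default=k) ported as foldl max k
def hurdleRace_alt (k : Int) (height : List Int) : Int :=
  max 0 (height.foldl max k - k)

-- ===== PRECONDITION & SPEC =====
def Spec_hurdleRace (k : Int) (height : List Int) (out : Int) : Prop := out = hurdleRace_alt k height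
instance (k : Int) (height : List Int) (out : Int) : Decidable (Spec_hurdleRace k height out) := by unfold Spec_hurdleRace; infer_instance

-- ===== CLAIM (what is proved, stated in full; the proofs are below) =====
def Claim_equal_hurdleRace : Prop := ∀ (k : Int) (height : List Int), Dom_hurdleRace k height → Spec_hurdleRace k height (hurdleRace k height)

-- ===== LEMMAS AND PROOFS =====

theorem pv_foldl_snd (height : List Int) : ∀ (k p : Int),
    (height.foldl (fun s i => if s.1 ≥ i then (s.1, s.2 + 0) else (i, s.2 + (i - s.1))) (k, p)).2
      = p + (height.foldl max k - k) := by
  induction height with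
  | nil => intro k p; simp
  | cons i t ih =>
    intro k p
    simp only [List.foldl_cons]
    by_cases h : k ≥ i
    · have hm : max k i = k := by omega
      simp only [if_pos h, hm, ih k (p + 0)]
      omega
    · have hm : max k i = i := by omega
      simp only [if_neg h, hm, ih i (p + (i - k))]
      omega

theorem pv_le_foldl_max (height : List Int) : ∀ (k : Int), k ≤ height.foldl max k := by
  induction height with
  | nil => intro k; simp
  | cons i t ih =>
    intro k
    simp only [List.foldl_cons]
    exact le_trans (le_max_left k i) (ih (max k i))

-- ===== VERDICT (by name: the statement is the Claim_ definition above) =====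
theorem hurdleRace_spec : Claim_equal_hurdleRace := by
  intro k height _
  unfold Spec_hurdleRace hurdleRace hurdleRace_alt
  rw [pv_foldl_snd height k 0]
  have := pv_le_foldl_max height k
  omega
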